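-- pv_equiv track=rewrite | github.com/neoai-agent/coralogix-mcp | coralogix_mcp/client.py | find_best_match_basic
-- ===== SOURCE A (Python) =====
-- def find_best_match_basic(target: str, candidates: list) -> str:
--     """Basic fallback matching function when LLM is not available"""
--     if not target or not candidates:
--         return None
--
--     # Convert to lowercase for case-insensitive matching
--     target = target.lower()
--
--     # Exact match check
--     for candidate in candidates:
--         if candidate.lower() == target:
--             return candidate
--
--     # Partial match check (contains)
--     partial_matches = [
--         c for c in candidates
--         if target in c.lower() or c.lower() in target
--     ]
--
--     if partial_matches:
--         # Sort by length to prefer shorter, more precise matches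
--         partial_matches.sort(key=len)
--         return partial_matches[0]
--
--     return None
-- ===== SOURCE B (Python) =====
-- def find_best_match_basic(target: str, candidates: list) -> str:
--     """One pass: track first exact match and shortest partial match simultaneously."""
--     if not target or not candidates:
--         return None
--     t = target.lower()
--     exact = None
--     best = None
--     for c in candidates:
--         cl = c.lower()
--         if exact is None and cl == t:
--             exact = c
--         if (t in cl or cl in t) and (best is None or len(c) < len(best)):
--             best = c
--     return exact if exact is not None else best
-- ===== Notes on version B (the rewrite author's own statement) =====
-- stated objective: simpler
-- what changed: Replaces A's two phases (early-return exact scan, then building a partial-match list and stable-sorting it by length) with a single pass over candidates that maintains two accumulators: the first exact match and the shortest partial match (strict < keeps the earliest on ties), decided after the loop.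
import Mathlib
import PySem

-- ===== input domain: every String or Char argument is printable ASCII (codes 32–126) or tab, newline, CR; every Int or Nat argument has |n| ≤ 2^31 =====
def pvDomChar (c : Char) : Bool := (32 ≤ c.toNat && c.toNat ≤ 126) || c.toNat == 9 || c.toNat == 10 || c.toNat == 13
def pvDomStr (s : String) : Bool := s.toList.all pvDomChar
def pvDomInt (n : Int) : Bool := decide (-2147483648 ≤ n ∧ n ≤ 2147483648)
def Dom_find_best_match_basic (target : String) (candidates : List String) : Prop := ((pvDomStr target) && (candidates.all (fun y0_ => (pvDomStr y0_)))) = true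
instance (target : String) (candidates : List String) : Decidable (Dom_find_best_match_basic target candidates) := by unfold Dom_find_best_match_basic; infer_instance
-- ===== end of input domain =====

-- B replaces A's two phases (early-return exact scan, then filter + stable sort by length)
-- by a single pass keeping two accumulators (first exact match, shortest partial match); objective: simpler.

-- ===== PORT A =====
def find_best_match_basic (target : String) (candidates : List String) : Option String :=
  if target = "" ∨ candidates = [] then none
  else
    let t := PySem.Str.lower target
    -- exact match loop: return the first candidate whose lowercase equals t
    match candidates.find? (fun c => PySem.Str.lower c == t) with
    | some c => some c
    | none =>
      -- partial match check (contains), then stable sort by length and take the first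
      let pm := candidates.filter (fun c => PySem.Str.isIn t (PySem.Str.lower c) || PySem.Str.isIn (PySem.Str.lower c) t)
      if pm = [] then none
      else PySem.List.pyGet? (PySem.List.sorted pm (fun c => PySem.Str.len c)) 0

-- ===== PORT B =====
def find_best_match_basic_alt (target : String) (candidates : List String) : Option String :=
  if target = "" ∨ candidates = [] then none
  else
    let t := PySem.Str.lower target
    -- one pass: acc.1 = first exact match so far, acc.2 = shortest partial match so far
    let r := candidates.foldl (fun (acc : Option String × Option String) c =>
        ((if acc.1.isNone && (PySem.Str.lower c == t) then some c else acc.1),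
         (if (PySem.Str.isIn t (PySem.Str.lower c) || PySem.Str.isIn (PySem.Str.lower c) t) &&
             (acc.2.elim true (fun b => decide (PySem.Str.len c < PySem.Str.len b)))
          then some c else acc.2)))
      (none, none)
    if r.1.isSome then r.1 else r.2

-- ===== PRECONDITION & SPEC =====
def Spec_find_best_match_basic (target : String) (candidates : List String) (out : Option String) : Prop := out = find_best_match_basic_alt target candidates
instance (target : String) (candidates : List String) (out : Option String) : Decidable (Spec_find_best_match_basic target candidates out) := by unfold Spec_find_best_match_basic; infer_instance

-- ===== CLAIM (what is proved, stated in full; the proofs are below) =====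
def Claim_equal_find_best_match_basic : Prop := ∀ (target : String) (candidates : List String), Dom_find_best_match_basic target candidates → Spec_find_best_match_basic target candidates (find_best_match_basic target candidates)

-- ===== LEMMAS AND PROOFS =====

-- "first element of minimal key, scanning left with strict <" as one named step
def pickStep {α : Type} (key : α → Int) (a : Option α) (c : α) : Option α :=
  a.elim (some c) (fun b => if key c < key b then some c else some b)

-- the "first exact match" accumulator computes List.find?
theorem foldl_first_some {α : Type} (p : α → Bool) (l : List α) (v : α) :
    l.foldl (fun (a : Option α) c => if a.isNone && p c then some c else a) (some v) = some v := by
  induction l with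
  | nil => rfl
  | cons c l ih => simpa using ih

theorem foldl_first_eq_find? {α : Type} (p : α → Bool) (l : List α) :
    l.foldl (fun (a : Option α) c => if a.isNone && p c then some c else a) none = l.find? p := by
  induction l with
  | nil => rfl
  | cons c l ih =>
    rw [List.foldl_cons]
    by_cases h : p c = true
    · rw [if_pos (by simp [h]), foldl_first_some]
      simp [List.find?, h]
    · rw [if_neg (by simp [h]), ih]
      simp [List.find?, h]

-- the guarded shortest-so-far step over l = the plain pickStep over the filtered list
theorem foldl_pick_filter {α : Type} (q : α → Bool) (key : α → Int) (l : List α) (a : Option α) :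
    l.foldl (fun (a : Option α) c =>
        if q c && (a.elim true (fun b => decide (key c < key b))) then some c else a) a
      = (l.filter q).foldl (pickStep key) a := by
  induction l generalizing a with
  | nil => rfl
  | cons c l ih =>
    by_cases h : q c = true
    · have hstep : (if q c && (a.elim true (fun b => decide (key c < key b))) then some c else a)
          = pickStep key a c := by
        cases a with
        | none => simp [h, pickStep]
        | some b => by_cases h2 : key c < key b <;> simp [h, h2, pickStep]
      rw [List.foldl_cons, hstep, ih, List.filter_cons_of_pos h, List.foldl_cons]
    · have hstep : (if q c && (a.elim true (fun b => decide (key c < key b))) then some c else a) = a := by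
        simp [h]
      rw [List.foldl_cons, hstep, ih, List.filter_cons_of_neg (by simp [h])]

-- head of insertBy (the insertion step of Python's stable sort)
theorem head?_insertBy {α : Type} (key : α → Int) (x : α) (ys : List α) :
    (PySem.List.insertBy (fun a b => decide (key a < key b)) x ys).head? = pickStep key ys.head? x := by
  cases ys with
  | nil => rfl
  | cons y ys' =>
    by_cases h : key x < key y <;> simp [PySem.List.insertBy, h, pickStep]

theorem head?_foldl_insertBy {α : Type} (key : α → Int) (l : List α) (acc : List α) :
    (l.foldl (fun acc x => PySem.List.insertBy (fun a b => decide (key a < key b)) x acc) acc).head?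
      = l.foldl (pickStep key) acc.head? := by
  induction l generalizing acc with
  | nil => rfl
  | cons c l ih =>
    rw [List.foldl_cons, List.foldl_cons, ih, head?_insertBy]

-- head of Python's stable sort by key = left-to-right strict-< minimum selection
theorem head?_sorted_eq_foldl {α : Type} (key : α → Int) (l : List α) :
    (PySem.List.sorted l key).head? = l.foldl (pickStep key) none := by
  rw [PySem.List.sorted_eq_foldl_insertBy, head?_foldl_insertBy]
  rfl

theorem pyGet?_zero_eq_head? {α : Type} (l : List α) : PySem.List.pyGet? l 0 = l.head? := by
  cases l <;> simp [PySem.List.pyGet?, PySem.List.pyIdx?]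

-- ===== VERDICT (by name: the statement is the Claim_ definition above) =====
theorem find_best_match_basic_spec : Claim_equal_find_best_match_basic := by
  intro target candidates _
  unfold Spec_find_best_match_basic find_best_match_basic find_best_match_basic_alt
  by_cases hg : target = "" ∨ candidates = []
  · simp [hg]
  · simp only [hg, if_false]
    rw [PySem.List.foldl_prod_mk
        (fun (a : Option String) c => if a.isNone && (PySem.Str.lower c == PySem.Str.lower target) then some c else a)
        (fun (a : Option String) c =>
          if (PySem.Str.isIn (PySem.Str.lower target) (PySem.Str.lower c) || PySem.Str.isIn (PySem.Str.lower c) (PySem.Str.lower target)) &&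
             (a.elim true (fun b => decide (PySem.Str.len c < PySem.Str.len b)))
          then some c else a)
        candidates none none]
    rw [foldl_first_eq_find?]
    have hbest :
        candidates.foldl (fun (a : Option String) c =>
          if (PySem.Str.isIn (PySem.Str.lower target) (PySem.Str.lower c) || PySem.Str.isIn (PySem.Str.lower c) (PySem.Str.lower target)) &&
             (a.elim true (fun b => decide (PySem.Str.len c < PySem.Str.len b)))
          then some c else a) none
        = (PySem.List.sorted
            (candidates.filter (fun c => PySem.Str.isIn (PySem.Str.lower target) (PySem.Str.lower c) || PySem.Str.isIn (PySem.Str.lower c) (PySem.Str.lower target)))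
            (fun c => PySem.Str.len c)).head? := by
      rw [foldl_pick_filter, head?_sorted_eq_foldl]
    cases hf : candidates.find? (fun c => PySem.Str.lower c == PySem.Str.lower target) with
    | some e => simp
    | none =>
      rw [hbest]
      by_cases hpm : candidates.filter (fun c => PySem.Str.isIn (PySem.Str.lower target) (PySem.Str.lower c) || PySem.Str.isIn (PySem.Str.lower c) (PySem.Str.lower target)) = []
      · rw [hpm]
        simp [PySem.List.sorted_eq_foldl_insertBy]
      · rw [if_neg hpm, pyGet?_zero_eq_head?]
        simp
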